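-- pv_equiv track=rewrite | github.com/spaikius/subseq | subseq/SmithWaterman.py | construct_alignment_string
-- ===== SOURCE A (Python) =====
-- def construct_alignment_string(aligned_seq1, aligned_seq2):
--     identities, gaps, mismatches = 0, 0, 0
--     alignment_string = ''
--
--     for aa1, aa2 in zip(aligned_seq1, aligned_seq2):
--         if aa1 == aa2:
--             alignment_string += '|'
--             identities += 1
--
--         elif '-' in (aa1, aa2):
--             alignment_string += ' '
--             gaps += 1
--
--         else:
--             alignment_string += ':'
--             mismatches += 1
--
--     return alignment_string, identities, gaps, mismatches
-- ===== SOURCE B (Python) =====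
-- def construct_alignment_string(aligned_seq1, aligned_seq2):
--     pairs = list(zip(aligned_seq1, aligned_seq2))
--     eq_pos = [i for i, (a, b) in enumerate(pairs) if a == b]
--     gap_pos = [i for i, (a, b) in enumerate(pairs) if a != b and '-' in (a, b)]
--     marks = [':'] * len(pairs)
--     for i in eq_pos:
--         marks[i] = '|'
--     for i in gap_pos:
--         marks[i] = ' '
--     return (''.join(marks), len(eq_pos), len(gap_pos),
--             len(pairs) - len(eq_pos) - len(gap_pos))
-- ===== Notes on version B (the rewrite author's own statement) =====
-- stated objective: alternative
-- what changed: B has no three-branch classifier loop: it precomputes the identity and gap position lists from enumerate, builds the marker string by patching an all-':' list at those positions, returns the counts as the lengths of the position lists and derives mismatches arithmetically as len - identities - gaps.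
import Mathlib
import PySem

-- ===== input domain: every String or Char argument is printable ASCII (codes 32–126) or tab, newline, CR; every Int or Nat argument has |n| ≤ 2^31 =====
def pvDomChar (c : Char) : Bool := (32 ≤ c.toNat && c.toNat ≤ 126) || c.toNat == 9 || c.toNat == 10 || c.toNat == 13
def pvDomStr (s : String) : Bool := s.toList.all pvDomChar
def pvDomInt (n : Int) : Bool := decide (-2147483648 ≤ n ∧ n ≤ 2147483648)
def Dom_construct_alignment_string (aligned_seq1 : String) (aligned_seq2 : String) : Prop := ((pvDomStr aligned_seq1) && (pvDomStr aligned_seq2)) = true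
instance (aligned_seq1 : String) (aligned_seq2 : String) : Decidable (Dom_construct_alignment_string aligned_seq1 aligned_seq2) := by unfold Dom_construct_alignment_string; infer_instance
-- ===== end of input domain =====

-- B replaces A's three-branch counting loop by position lists: it patches an all-':' marker list
-- at the precomputed identity/gap positions and derives the counts from the lists' lengths
-- (objective: alternative decomposition, same cost).

-- ===== PORT A =====
-- A's loop over zip(aligned_seq1, aligned_seq2), threading (alignment_string, identities, gaps, mismatches);
-- the growing string is carried as its character list and packed with String.ofList at the end (exact).
def construct_alignment_string (aligned_seq1 : String) (aligned_seq2 : String) : String × Int × Int × Int :=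
  let st := (List.zip aligned_seq1.toList aligned_seq2.toList).foldl
    (fun (st : List Char × Int × Int × Int) p =>
      if p.1 = p.2 then (st.1 ++ ['|'], st.2.1 + 1, st.2.2.1, st.2.2.2)
      else if p.1 = '-' ∨ p.2 = '-' then (st.1 ++ [' '], st.2.1, st.2.2.1 + 1, st.2.2.2)
      else (st.1 ++ [':'], st.2.1, st.2.2.1, st.2.2.2 + 1))
    ([], 0, 0, 0)
  (String.ofList st.1, st.2.1, st.2.2.1, st.2.2.2)

-- ===== PORT B =====
-- Source B step for step: enumerate-filtered position lists, [':'] * n patched at those positions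
-- (the enumerate indices are ≥ 0 and < n, so 'marks[i] = c' is exactly 'List.set i.toNat c'),
-- counts = lengths, mismatches = n - identities - gaps.
def construct_alignment_string_alt (aligned_seq1 : String) (aligned_seq2 : String) : String × Int × Int × Int :=
  let pairs := List.zip aligned_seq1.toList aligned_seq2.toList
  let eqPos := ((PySem.List.enumerate pairs).filter (fun x => x.2.1 == x.2.2)).map (·.1)
  let gapPos := ((PySem.List.enumerate pairs).filter
      (fun x => !(x.2.1 == x.2.2) && (x.2.1 == '-' || x.2.2 == '-'))).map (·.1)
  let marks0 := List.replicate pairs.length ':'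
  let marks1 := eqPos.foldl (fun m i => m.set i.toNat '|') marks0
  let marks2 := gapPos.foldl (fun m i => m.set i.toNat ' ') marks1
  (String.ofList marks2, (eqPos.length : Int), (gapPos.length : Int),
   (pairs.length : Int) - eqPos.length - gapPos.length)

-- ===== PRECONDITION & SPEC =====
def Spec_construct_alignment_string (aligned_seq1 : String) (aligned_seq2 : String) (out : String × Int × Int × Int) : Prop := out = construct_alignment_string_alt aligned_seq1 aligned_seq2
instance (aligned_seq1 : String) (aligned_seq2 : String) (out : String × Int × Int × Int) : Decidable (Spec_construct_alignment_string aligned_seq1 aligned_seq2 out) := by unfold Spec_construct_alignment_string; infer_instance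

-- ===== CLAIM (what is proved, stated in full; the proofs are below) =====
def Claim_equal_construct_alignment_string : Prop := ∀ (aligned_seq1 : String) (aligned_seq2 : String), Dom_construct_alignment_string aligned_seq1 aligned_seq2 → Spec_construct_alignment_string aligned_seq1 aligned_seq2 (construct_alignment_string aligned_seq1 aligned_seq2)

-- ===== LEMMAS AND PROOFS =====

-- the mark A's branch chain appends for a pair
def pvClassify (aa1 aa2 : Char) : Char :=
  if aa1 = aa2 then '|' else if aa1 = '-' ∨ aa2 = '-' then ' ' else ':'

-- A's fold, from any state, appends the classified marks and counts each class.
theorem pvFold_eq (l : List (Char × Char)) (acc : List Char) (i g m : Int) :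
    l.foldl
      (fun (st : List Char × Int × Int × Int) p =>
        if p.1 = p.2 then (st.1 ++ ['|'], st.2.1 + 1, st.2.2.1, st.2.2.2)
        else if p.1 = '-' ∨ p.2 = '-' then (st.1 ++ [' '], st.2.1, st.2.2.1 + 1, st.2.2.2)
        else (st.1 ++ [':'], st.2.1, st.2.2.1, st.2.2.2 + 1))
      (acc, i, g, m)
    = (acc ++ l.map (fun p => pvClassify p.1 p.2),
       i + (l.countP (fun p => p.1 == p.2) : Int),
       g + (l.countP (fun p => !(p.1 == p.2) && (p.1 == '-' || p.2 == '-')) : Int),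
       m + (l.countP (fun p => !(p.1 == p.2) && !(p.1 == '-' || p.2 == '-')) : Int)) := by
  induction l generalizing acc i g m with
  | nil => simp
  | cons p t ih =>
    simp only [List.foldl_cons, List.map_cons, List.countP_cons]
    by_cases h1 : p.1 = p.2
    · rw [if_pos h1, ih]
      simp [pvClassify, h1]
      omega
    · by_cases h2 : p.1 = '-' ∨ p.2 = '-'
      · rw [if_neg h1, if_pos h2, ih]
        simp only [pvClassify, if_neg h1, if_pos h2]
        by_cases ha : p.1 = '-' <;> by_cases hb : p.2 = '-' <;>
          simp_all <;> omega
      · rw [if_neg h1, if_neg h2, ih]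
        simp only [pvClassify, if_neg h1, if_neg h2]
        by_cases ha : p.1 = '-' <;> by_cases hb : p.2 = '-' <;>
          simp_all <;> omega

-- length of the enumerate-filter-map position list = countP on the underlying list
theorem pvPos_len {α : Type} (l : List α) (p : α → Bool) (s : Int) :
    ((PySem.List.enumerate l s).filter (fun x => p x.2)).length
      = l.countP p := by
  induction l generalizing s with
  | nil => simp [PySem.List.enumerate_nil]
  | cons a t ih =>
    simp only [PySem.List.enumerate_cons, List.filter_cons, List.countP_cons]
    by_cases h : p a <;> simp [h, ih]

-- membership in the position list (start 0): exactly the indices whose pair satisfies p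
theorem pvPos_mem {α : Type} (l : List α) (p : α → Bool) (j : Nat) (hj : j < l.length) :
    ((j : Int) ∈ ((PySem.List.enumerate l 0).filter (fun x => p x.2)).map (·.1))
      ↔ p (l[j]) = true := by
  constructor
  · rintro h
    obtain ⟨x, hx, hx1⟩ := List.mem_map.mp h
    obtain ⟨hmem, hp⟩ := List.mem_filter.mp hx
    obtain ⟨k, hk, hxk⟩ := (PySem.List.mem_enumerate_iff _ _ _).mp hmem
    subst hxk
    simp only at hx1 hp
    have : k = j := by omega
    subst this; exact hp
  · intro hp
    refine List.mem_map.mpr ⟨((j : Int), l[j]), List.mem_filter.mpr ⟨?_, hp⟩, rfl⟩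
    exact (PySem.List.mem_enumerate_iff _ _ _).mpr ⟨j, hj, by simp⟩

-- element of a set-fold with out-of-... : final[j] = c if some index maps to j, else unchanged
theorem pvFoldSet_getElem (idxs : List Int) (m : List Char) (c : Char) (j : Nat)
    (hj : j < (idxs.foldl (fun m i => m.set i.toNat c) m).length)
    (hj' : j < m.length) :
    (idxs.foldl (fun m i => m.set i.toNat c) m)[j]
      = if (∃ i ∈ idxs, i.toNat = j) then c else m[j] := by
  induction idxs generalizing m with
  | nil => simp
  | cons a t ih =>
    simp only [List.foldl_cons]
    rw [ih _ (by simpa using hj) (by simpa using hj')]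
    by_cases hmem : ∃ i ∈ t, i.toNat = j
    · obtain ⟨i, hi, h2⟩ := hmem
      rw [if_pos ⟨i, hi, h2⟩, if_pos ⟨i, List.mem_cons_of_mem _ hi, h2⟩]
    · simp only [hmem, if_false]
      by_cases ha : a.toNat = j
      · rw [List.getElem_set, if_pos ha, if_pos ⟨a, by simp, ha⟩]
      · rw [List.getElem_set, if_neg ha, if_neg]
        rintro ⟨i, hi, h2⟩
        rcases List.mem_cons.mp hi with rfl | hi'
        · exact ha h2
        · exact hmem ⟨i, hi', h2⟩

theorem pvFoldSet_length (idxs : List Int) (m : List Char) (c : Char) :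
    (idxs.foldl (fun m i => m.set i.toNat c) m).length = m.length := by
  induction idxs generalizing m with
  | nil => rfl
  | cons a t ih => simp [List.foldl_cons, ih]

-- the three class counts partition the length
theorem pvCount_partition (l : List (Char × Char)) :
    l.countP (fun p => p.1 == p.2)
      + l.countP (fun p => !(p.1 == p.2) && (p.1 == '-' || p.2 == '-'))
      + l.countP (fun p => !(p.1 == p.2) && !(p.1 == '-' || p.2 == '-'))
      = l.length := by
  induction l with
  | nil => rfl
  | cons a t ih =>
    simp only [List.countP_cons, List.length_cons]
    cases h1 : (a.1 == a.2) <;> cases h2 : (a.1 == '-' || a.2 == '-') <;>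
      simp_all <;> omega

-- the patched marker list is the classified map
theorem pvMarks_eq (pairs : List (Char × Char)) :
    ((((PySem.List.enumerate pairs 0).filter
        (fun x => !(x.2.1 == x.2.2) && (x.2.1 == '-' || x.2.2 == '-'))).map (·.1)).foldl
      (fun m i => m.set i.toNat ' ')
      (((((PySem.List.enumerate pairs 0).filter (fun x => x.2.1 == x.2.2)).map (·.1)).foldl
        (fun m i => m.set i.toNat '|') (List.replicate pairs.length ':'))))
    = pairs.map (fun p => pvClassify p.1 p.2) := by
  apply List.ext_getElem
  · simp [pvFoldSet_length]
  · intro j hj hj'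
    have hjp : j < pairs.length := by simpa using hj'
    have h1 : j < (List.replicate pairs.length ':').length := by simpa using hjp
    rw [pvFoldSet_getElem _ _ _ _ hj (by simp [pvFoldSet_length, hjp]),
        pvFoldSet_getElem _ _ _ _ (by simp [pvFoldSet_length, hjp]) h1]
    have hmemg : (∃ i ∈ ((PySem.List.enumerate pairs 0).filter
        (fun x => !(x.2.1 == x.2.2) && (x.2.1 == '-' || x.2.2 == '-'))).map (·.1), i.toNat = j)
        ↔ (!(pairs[j].1 == pairs[j].2) && (pairs[j].1 == '-' || pairs[j].2 == '-')) = true := by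
      constructor
      · rintro ⟨i, hi, hij⟩
        have hge : 0 ≤ i := by
          obtain ⟨x, hx, hx1⟩ := List.mem_map.mp hi
          obtain ⟨k, hk, hxk⟩ := (PySem.List.mem_enumerate_iff _ _ _).mp (List.mem_filter.mp hx).1
          subst hxk; simp at hx1; omega
        have : i = (j : Int) := by omega
        subst this
        exact (pvPos_mem pairs (fun y => !(y.1 == y.2) && (y.1 == '-' || y.2 == '-')) j hjp).mp hi
      · intro h
        exact ⟨(j : Int), (pvPos_mem pairs (fun y => !(y.1 == y.2) && (y.1 == '-' || y.2 == '-')) j hjp).mpr h, by simp⟩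
    have hmeme : (∃ i ∈ ((PySem.List.enumerate pairs 0).filter
        (fun x => x.2.1 == x.2.2)).map (·.1), i.toNat = j)
        ↔ (pairs[j].1 == pairs[j].2) = true := by
      constructor
      · rintro ⟨i, hi, hij⟩
        have hge : 0 ≤ i := by
          obtain ⟨x, hx, hx1⟩ := List.mem_map.mp hi
          obtain ⟨k, hk, hxk⟩ := (PySem.List.mem_enumerate_iff _ _ _).mp (List.mem_filter.mp hx).1
          subst hxk; simp at hx1; omega
        have : i = (j : Int) := by omega
        subst this
        exact (pvPos_mem pairs (fun y => y.1 == y.2) j hjp).mp hi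
      · intro h
        exact ⟨(j : Int), (pvPos_mem pairs (fun y => y.1 == y.2) j hjp).mpr h, by simp⟩
    rw [List.getElem_map]
    simp only [hmemg, hmeme]
    by_cases h1 : pairs[j].1 = pairs[j].2
    · simp [pvClassify, h1]
    · by_cases h2 : pairs[j].1 = '-' ∨ pairs[j].2 = '-'
      · simp [pvClassify, h1, h2]
      · push_neg at h2
        simp [pvClassify, h1, h2.1, h2.2, List.getElem_replicate]

-- ===== VERDICT (by name: the statement is the Claim_ definition above) =====
theorem construct_alignment_string_spec : Claim_equal_construct_alignment_string := by
  intro s1 s2 _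
  unfold Spec_construct_alignment_string construct_alignment_string construct_alignment_string_alt
  simp only [pvFold_eq, List.nil_append]
  have hpart := pvCount_partition (List.zip s1.toList s2.toList)
  simp at hpart
  have hmin : min s1.length s2.length = (List.zip s1.toList s2.toList).length := by simp
  refine Prod.ext ?_ (Prod.ext ?_ (Prod.ext ?_ ?_)) <;> simp
  · rw [hmin, pvMarks_eq]
  · exact (pvPos_len _ _ _).symm
  · exact (pvPos_len _ _ _).symm
  · rw [pvPos_len _ (fun y : Char × Char => (y.1 == y.2)) 0,
        pvPos_len _ (fun y : Char × Char => !(y.1 == y.2) && (y.1 == '-' || y.2 == '-')) 0]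
    omega
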